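-- pv_equiv track=rewrite | github.com/prajwal041/ProblemSolving | codility/task2015/LogestPassword.py | solution
-- ===== SOURCE A (Python) =====
-- def solution(s):
--     longest = -1
--     letters = 0
--     digit =0
--     other = 0
--     for i in s:
--         if i.isalpha():
--             letters+=1
--         elif i.isdigit():
--             digit+=1
--         elif i ==" ":
--             if other==0 and letters%2==0 and digit%2==1:
--                 if longest < letters+ digit:
--                     longest = letters+digit
--             digit=letters=other=0
--         else:
--             other+=1
--     return longest
--
-- s="test 5 a0A pass007 ?xy1"
-- ===== SOURCE B (Python) =====
-- def solution(s):
--     best = -1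
--     # Segments are the space-separated chunks; the last chunk is never followed by
--     # a space, so (like A) it is never evaluated.
--     for word in s.split(" ")[:-1]:
--         letters = sum(c.isalpha() for c in word)
--         digits = sum(c.isdigit() for c in word)
--         if letters + digits == len(word) and letters % 2 == 0 and digits % 2 == 1 and len(word) > best:
--             best = len(word)
--     return best
-- ===== Notes on version B (the rewrite author's own statement) =====
-- stated objective: faster
-- what changed: B splits the input on spaces and computes letter/digit counts per space-terminated word (the last, unterminated segment is naturally skipped), taking the max valid word length, instead of A's single character scan with running counters mutated and reset in place.
import Mathlib
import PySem

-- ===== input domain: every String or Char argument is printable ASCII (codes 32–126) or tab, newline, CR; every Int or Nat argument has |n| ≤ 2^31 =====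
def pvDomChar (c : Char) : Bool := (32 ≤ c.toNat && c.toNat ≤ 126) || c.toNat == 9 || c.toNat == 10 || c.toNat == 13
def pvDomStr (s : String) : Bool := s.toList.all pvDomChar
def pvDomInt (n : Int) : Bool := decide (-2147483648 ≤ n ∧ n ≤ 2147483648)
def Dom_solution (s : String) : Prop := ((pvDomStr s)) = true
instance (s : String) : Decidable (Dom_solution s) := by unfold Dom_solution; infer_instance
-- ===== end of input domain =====

-- B re-implements A by a different decomposition: split into space-terminated segments and
-- take the max length of the valid ones, instead of A's single char scan with running counters.

-- ===== PORT A =====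
-- state = (longest, letters, digit, other)
def solStep (st : Int × Int × Int × Int) (c : Char) : Int × Int × Int × Int :=
  if PySem.Chars.isalpha c then (st.1, st.2.1 + 1, st.2.2.1, st.2.2.2)
  else if PySem.Chars.isdigit c then (st.1, st.2.1, st.2.2.1 + 1, st.2.2.2)
  else if c = ' ' then
    ((if st.2.2.2 = 0 ∧ PySem.Int.mod st.2.1 2 = 0 ∧ PySem.Int.mod st.2.2.1 2 = 1 ∧
          st.1 < st.2.1 + st.2.2.1
      then st.2.1 + st.2.2.1 else st.1), 0, 0, 0)
  else (st.1, st.2.1, st.2.2.1, st.2.2.2 + 1)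

def solution (s : String) : Int := (s.toList.foldl solStep (-1, 0, 0, 0)).1

-- ===== PORT B =====
-- per-word body of Source B's loop; sum(genexpr) over a predicate is List.countP
def wordStep (best : Int) (w : List Char) : Int :=
  let letters : Int := (w.countP PySem.Chars.isalpha : Nat)
  let digits : Int := (w.countP PySem.Chars.isdigit : Nat)
  if letters + digits = (w.length : Int) ∧ PySem.Int.mod letters 2 = 0 ∧
      PySem.Int.mod digits 2 = 1 ∧ best < (w.length : Int)
  then (w.length : Int) else best

-- s.split(" ") ported as List.splitOn ' ' (exact for a one-character separator); [:-1] is PySem slice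
def solution_alt (s : String) : Int :=
  (PySem.List.slice (s.toList.splitOn ' ') none (some (-1))).foldl wordStep (-1)

-- ===== PRECONDITION & SPEC =====
def Spec_solution (s : String) (out : Int) : Prop := out = solution_alt s
instance (s : String) (out : Int) : Decidable (Spec_solution s out) := by unfold Spec_solution; infer_instance

-- ===== CLAIM (what is proved, stated in full; the proofs are below) =====
def Claim_equal_solution : Prop := ∀ (s : String), Dom_solution s → Spec_solution s (solution s)

-- ===== LEMMAS AND PROOFS =====

-- character-class counts of a segment (cntD/cntO follow A's elif order)
def cntA (w : List Char) : Nat := w.countP PySem.Chars.isalpha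
def cntD (w : List Char) : Nat := w.countP (fun c => !PySem.Chars.isalpha c && PySem.Chars.isdigit c)
def cntO (w : List Char) : Nat :=
  w.countP (fun c => !PySem.Chars.isalpha c && !PySem.Chars.isdigit c && !(c == ' '))

-- what A's space branch does to `longest`, with carried-in counters l d o added to w's counts
def carryStep (best l d o : Int) (w : List Char) : Int :=
  if o + (cntO w : Int) = 0 ∧ PySem.Int.mod (l + (cntA w : Int)) 2 = 0 ∧
      PySem.Int.mod (d + (cntD w : Int)) 2 = 1 ∧ best < l + (cntA w : Int) + (d + (cntD w : Int))
  then l + (cntA w : Int) + (d + (cntD w : Int)) else best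

def carryFold (best l d o : Int) : List (List Char) → Int
  | [] => best
  | [_] => best
  | w :: w2 :: ws => carryFold (carryStep best l d o w) 0 0 0 (w2 :: ws)

lemma isdigit_not_isalpha (c : Char) (h : PySem.Chars.isdigit c = true) :
    PySem.Chars.isalpha c = false := by
  simp only [PySem.Chars.isdigit, PySem.Chars.isalpha, PySem.Chars.isupper, PySem.Chars.islower,
    Bool.and_eq_true, decide_eq_true_eq, Bool.or_eq_false_iff, Bool.and_eq_false_iff,
    decide_eq_false_iff_not, Char.le_def, UInt32.le_iff_toNat_le,
    show '0'.val.toNat = 48 from rfl, show '9'.val.toNat = 57 from rfl,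
    show 'A'.val.toNat = 65 from rfl, show 'Z'.val.toNat = 90 from rfl,
    show 'a'.val.toNat = 97 from rfl, show 'z'.val.toNat = 122 from rfl] at *
  omega

lemma cntD_eq_countP_isdigit (w : List Char) : cntD w = w.countP PySem.Chars.isdigit := by
  unfold cntD
  refine List.countP_congr (fun c _ => ?_)
  by_cases h : PySem.Chars.isdigit c = true
  · simp [h, isdigit_not_isalpha c h]
  · simp [Bool.eq_false_iff.mpr h]

lemma partition_len (w : List Char) (h : ' ' ∉ w) : cntA w + cntD w + cntO w = w.length := by
  induction w with
  | nil => simp [cntA, cntD, cntO]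
  | cons c cs ih =>
    have hc : c ≠ ' ' := fun hcc => h (hcc ▸ List.mem_cons_self)
    have ih' := ih (fun hm => h (List.mem_cons_of_mem c hm))
    simp only [cntA, cntD, cntO, List.countP_cons, List.length_cons] at *
    by_cases ha : PySem.Chars.isalpha c = true
    · simp [ha]; omega
    · by_cases hd : PySem.Chars.isdigit c = true
      · simp [Bool.eq_false_iff.mpr ha, hd]; omega
      · simp [Bool.eq_false_iff.mpr ha, Bool.eq_false_iff.mpr hd, hc]; omega

-- carryStep with zero carry on a space-free word is exactly Source B's per-word step
lemma carryStep_zero (best : Int) (w : List Char) (h : ' ' ∉ w) :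
    carryStep best 0 0 0 w = wordStep best w := by
  have hp := partition_len w h
  rw [cntD_eq_countP_isdigit] at hp
  simp only [cntA] at hp
  unfold carryStep wordStep
  rw [cntD_eq_countP_isdigit]
  simp only [zero_add, cntA]
  by_cases ho : cntO w = 0
  · have hlen : w.countP PySem.Chars.isalpha + w.countP PySem.Chars.isdigit = w.length := by omega
    have hc : ((w.countP PySem.Chars.isalpha : Int)) + (w.countP PySem.Chars.isdigit : Nat) =
        (w.length : Int) := by exact_mod_cast hlen
    simp [ho, hc]
  · have h1 : ¬ ((cntO w : Int) = 0) := by exact_mod_cast ho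
    have h2 : ¬ (((w.countP PySem.Chars.isalpha : Nat) : Int) +
        ((w.countP PySem.Chars.isdigit : Nat) : Int) = (w.length : Int)) := by
      intro hq
      have : w.countP PySem.Chars.isalpha + w.countP PySem.Chars.isdigit = w.length := by
        exact_mod_cast hq
      omega
    simp only [h1, h2, false_and, if_false]

lemma splitOnP_space_ne_nil (cs : List Char) :
    List.splitOnP (fun c => c == ' ') cs ≠ [] := List.splitOnP_ne_nil _ cs

lemma nospace_splitOnP (cs : List Char) :
    ∀ u ∈ List.splitOnP (fun c => c == ' ') cs, ' ' ∉ u := by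
  induction cs with
  | nil => intro u hu; simp [List.splitOnP_nil] at hu; simp [hu]
  | cons c cs ih =>
    intro u hu
    rw [List.splitOnP_cons] at hu
    by_cases hc : c = ' '
    · simp [hc] at hu
      rcases hu with h | h
      · simp [h]
      · exact ih u h
    · simp [hc] at hu
      obtain ⟨w, ws, hsplit⟩ : ∃ w ws, List.splitOnP (fun c => c == ' ') cs = w :: ws := by
        cases h : List.splitOnP (fun c => c == ' ') cs with
        | nil => exact absurd h (splitOnP_space_ne_nil cs)
        | cons w ws => exact ⟨w, ws, rfl⟩
      rw [hsplit] at hu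
      simp only [List.modifyHead_cons, List.mem_cons] at hu
      rcases hu with h | h
      · subst h
        intro hm
        rcases List.mem_cons.mp hm with h' | h'
        · exact hc h'.symm
        · exact ih w (hsplit ▸ (by simp)) h'
      · exact ih u (hsplit ▸ List.mem_cons_of_mem w h)

-- carryFold with non-space head char absorbed into the carry
lemma carryFold_cons_nonspace (c : Char) (w : List Char) (ws : List (List Char))
    (best l d o l' d' o' : Int)
    (hA : l + ((cntA (c :: w) : Nat) : Int) = l' + (cntA w : Nat))
    (hD : d + ((cntD (c :: w) : Nat) : Int) = d' + (cntD w : Nat))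
    (hO : o + ((cntO (c :: w) : Nat) : Int) = o' + (cntO w : Nat)) :
    carryFold best l d o ((c :: w) :: ws) = carryFold best l' d' o' (w :: ws) := by
  cases ws with
  | nil => rfl
  | cons w2 ws =>
    show carryFold (carryStep best l d o (c :: w)) 0 0 0 (w2 :: ws) =
      carryFold (carryStep best l' d' o' w) 0 0 0 (w2 :: ws)
    congr 1
    unfold carryStep
    rw [hA, hD, hO]

-- the char-level loop of A computed over the split, with carried counters
lemma loopA_eq_carryFold (cs : List Char) : ∀ best l d o : Int,
    (cs.foldl solStep (best, l, d, o)).1 =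
      carryFold best l d o (List.splitOnP (fun c => c == ' ') cs) := by
  induction cs with
  | nil => intro best l d o; simp [List.splitOnP_nil, carryFold]
  | cons c cs ih =>
    intro best l d o
    rw [List.splitOnP_cons, List.foldl_cons]
    obtain ⟨w, ws, hsplit⟩ : ∃ w ws, List.splitOnP (fun c => c == ' ') cs = w :: ws := by
      cases h : List.splitOnP (fun c => c == ' ') cs with
      | nil => exact absurd h (splitOnP_space_ne_nil cs)
      | cons w ws => exact ⟨w, ws, rfl⟩
    by_cases ha : PySem.Chars.isalpha c = true
    · have hs : c ≠ ' ' := by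
        intro h; subst h; exact absurd ha (by decide)
      rw [if_neg (by simp [hs]), hsplit, List.modifyHead_cons]
      rw [show solStep (best, l, d, o) c = (best, l + 1, d, o) by simp [solStep, ha], ih]
      rw [hsplit]
      refine (carryFold_cons_nonspace c w ws best l d o (l+1) d o ?_ ?_ ?_).symm
      · simp [cntA, ha]; ring
      · simp [cntD, ha]
      · simp [cntO, ha]
    · by_cases hd : PySem.Chars.isdigit c = true
      · have hs : c ≠ ' ' := by
          intro h; subst h; exact absurd hd (by decide)
        rw [if_neg (by simp [hs]), hsplit, List.modifyHead_cons]
        rw [show solStep (best, l, d, o) c = (best, l, d + 1, o) by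
          simp [solStep, Bool.eq_false_iff.mpr ha, hd], ih]
        rw [hsplit]
        refine (carryFold_cons_nonspace c w ws best l d o l (d+1) o ?_ ?_ ?_).symm
        · simp [cntA, Bool.eq_false_iff.mpr ha]
        · simp [cntD, Bool.eq_false_iff.mpr ha, hd]; ring
        · simp [cntO, Bool.eq_false_iff.mpr ha, hd]
      · by_cases hs : c = ' '
        · subst hs
          rw [if_pos (by simp)]
          rw [show solStep (best, l, d, o) ' ' =
              ((if o = 0 ∧ PySem.Int.mod l 2 = 0 ∧ PySem.Int.mod d 2 = 1 ∧ best < l + d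
                then l + d else best), 0, 0, 0) from by
            simp [solStep, show PySem.Chars.isalpha ' ' = false from by decide,
              show PySem.Chars.isdigit ' ' = false from by decide], ih]
          rw [hsplit]
          show carryFold _ 0 0 0 (w :: ws) = carryFold (carryStep best l d o []) 0 0 0 (w :: ws)
          congr 1
          simp [carryStep, cntA, cntD, cntO]
        · rw [if_neg (by simp [hs]), hsplit, List.modifyHead_cons]
          rw [show solStep (best, l, d, o) c = (best, l, d, o + 1) by
            simp [solStep, Bool.eq_false_iff.mpr ha, Bool.eq_false_iff.mpr hd, hs], ih]
          rw [hsplit]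
          refine (carryFold_cons_nonspace c w ws best l d o l d (o+1) ?_ ?_ ?_).symm
          · simp [cntA, Bool.eq_false_iff.mpr ha]
          · simp [cntD, Bool.eq_false_iff.mpr ha, Bool.eq_false_iff.mpr hd]
          · simp [cntO, Bool.eq_false_iff.mpr ha, Bool.eq_false_iff.mpr hd, hs]
            ring

-- carryFold from a zero carry over space-free words is B's fold over all words but the last
lemma carryFold_eq_foldl (ws : List (List Char)) : ∀ w best,
    (∀ u ∈ w :: ws, ' ' ∉ u) →
    carryFold best 0 0 0 (w :: ws) = ((w :: ws).dropLast).foldl wordStep best := by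
  induction ws with
  | nil => intro w best _; rfl
  | cons w2 ws ih =>
    intro w best h
    show carryFold (carryStep best 0 0 0 w) 0 0 0 (w2 :: ws) = _
    rw [ih w2 _ (fun u hu => h u (List.mem_cons_of_mem w hu))]
    rw [carryStep_zero best w (h w (by simp))]
    rfl

-- ===== VERDICT (by name: the statement is the Claim_ definition above) =====
theorem solution_spec : Claim_equal_solution := by
  intro s _
  show solution s = solution_alt s
  unfold solution solution_alt
  rw [PySem.List.slice_to_neg_one]
  rw [show List.splitOn ' ' s.toList = List.splitOnP (fun c => c == ' ') s.toList from rfl]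
  obtain ⟨w, ws, hsplit⟩ : ∃ w ws,
      List.splitOnP (fun c => c == ' ') s.toList = w :: ws := by
    cases h : List.splitOnP (fun c => c == ' ') s.toList with
    | nil => exact absurd h (splitOnP_space_ne_nil _)
    | cons w ws => exact ⟨w, ws, rfl⟩
  rw [loopA_eq_carryFold, hsplit,
    carryFold_eq_foldl ws w (-1) (fun u hu => nospace_splitOnP s.toList u (hsplit ▸ hu))]
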